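-- pv_equiv track=rewrite | github.com/jupeeter8/Competetive-Programming | Practice/sorting/reducingdishes.py | reduceDishes2
-- ===== SOURCE A (Python) =====
-- def reduceDishes2(sat: list[int]) -> int:
--     sat.sort()
--     satisfaction = 0
--     total_satisfation = 0
--     prefix_sum = 0
--
--     for i in reversed(range(len(sat))):
--         prefix_sum += sat[i]
--         total_satisfation += prefix_sum
--         satisfaction = max(satisfaction, total_satisfation)
--     return satisfaction
-- ===== SOURCE B (Python) =====
-- def reduceDishes2(sat: list[int]) -> int:
--     sat.sort()
--     n = len(sat)
--     best = 0
--     for start in range(n + 1):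
--         cur = sum((i - start + 1) * sat[i] for i in range(start, n))
--         best = max(best, cur)
--     return best
-- ===== Notes on version B (the rewrite author's own statement) =====
-- stated objective: alternative
-- what changed: Replaces A's single reverse accumulating pass (running prefix/total/max) by a brute-force outer loop over all cut points, recomputing each suffix's weighted like-time coefficient from scratch and taking the max.
import Mathlib
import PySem

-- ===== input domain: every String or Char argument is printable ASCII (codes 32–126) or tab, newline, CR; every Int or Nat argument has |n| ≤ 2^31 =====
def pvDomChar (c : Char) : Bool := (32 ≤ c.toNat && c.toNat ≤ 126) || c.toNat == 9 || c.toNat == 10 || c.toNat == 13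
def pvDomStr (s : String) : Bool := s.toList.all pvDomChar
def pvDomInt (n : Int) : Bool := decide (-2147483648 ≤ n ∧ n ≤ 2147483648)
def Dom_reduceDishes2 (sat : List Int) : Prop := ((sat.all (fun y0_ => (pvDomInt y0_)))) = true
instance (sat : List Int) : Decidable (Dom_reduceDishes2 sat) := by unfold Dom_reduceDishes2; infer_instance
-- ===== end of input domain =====

-- B replaces A's single reverse accumulating pass by a brute-force loop over all cut
-- points, recomputing each suffix's weighted coefficient from scratch (alternative, not faster).
-- Both Pythons sort `sat` in place; the equivalence proved here is about the return value.

-- ===== PORT A =====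
def reduceDishes2 (sat : List Int) : Int :=
  let s := PySem.List.sorted sat id false
  let st := ((PySem.List.pyRange 0 (s.length : Int) 1).reverse).foldl
    (fun (acc : Int × Int × Int) i =>
      let prefix_sum := acc.2.2 + PySem.List.pyGetD s i 0
      let total := acc.2.1 + prefix_sum
      (max acc.1 total, total, prefix_sum)) (0, 0, 0)
  st.1

-- ===== PORT B =====
def reduceDishes2_alt (sat : List Int) : Int :=
  let s := PySem.List.sorted sat id false
  let n : Int := s.length
  (PySem.List.pyRange 0 (n + 1) 1).foldl
    (fun best start =>
      let cur := ((PySem.List.pyRange start n 1).map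
        (fun i => (i - start + 1) * PySem.List.pyGetD s i 0)).foldl (· + ·) 0
      max best cur) 0

-- ===== PRECONDITION & SPEC =====
def Spec_reduceDishes2 (sat : List Int) (out : Int) : Prop := out = reduceDishes2_alt sat
instance (sat : List Int) (out : Int) : Decidable (Spec_reduceDishes2 sat out) := by unfold Spec_reduceDishes2; infer_instance

-- ===== CLAIM (what is proved, stated in full; the proofs are below) =====
def Claim_equal_reduceDishes2 : Prop := ∀ (sat : List Int), Dom_reduceDishes2 sat → Spec_reduceDishes2 sat (reduceDishes2 sat)

-- ===== LEMMAS AND PROOFS =====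

-- weighted suffix sum: wsum [a,b,c] = 1*a + 2*b + 3*c
def wsum : List Int → Int
  | [] => 0
  | x :: t => x + t.sum + wsum t

-- max over all suffixes of wsum, floored at 0
def maxw : List Int → Int
  | [] => 0
  | x :: t => max (maxw t) (wsum (x :: t))

theorem foldrA_char (l : List Int) :
    l.foldr (fun x (acc : Int × Int × Int) =>
      (max acc.1 (acc.2.1 + (acc.2.2 + x)), acc.2.1 + (acc.2.2 + x), acc.2.2 + x))
      (0, 0, 0) = (maxw l, wsum l, l.sum) := by
  induction l with
  | nil => simp [maxw, wsum]
  | cons x t ih =>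
    simp only [List.foldr_cons, ih, maxw, wsum, List.sum_cons]
    refine Prod.ext ?_ (Prod.ext ?_ ?_) <;> simp <;> omega

theorem foldl_sum_gen (L : List Int) : ∀ a : Int, L.foldl (· + ·) a = a + L.sum := by
  induction L with
  | nil => intro a; simp
  | cons x t ih => intro a; simp only [List.foldl_cons, List.sum_cons, ih]; ring

theorem foldl_sum (L : List Int) : L.foldl (· + ·) 0 = L.sum := by
  rw [foldl_sum_gen]; ring

theorem sum_getD_range (t : List Int) :
    ((List.range t.length).map (fun (j : ℕ) => t.getD j 0)).sum = t.sum := by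
  induction t with
  | nil => simp
  | cons x t ih =>
    rw [List.length_cons, List.range_succ_eq_map]
    simp only [List.map_cons, List.map_map, List.sum_cons, Function.comp_def,
      List.getD_cons_zero, Nat.succ_eq_add_one, List.getD_cons_succ]
    rw [ih]

theorem wsum_eq_sum_range (t : List Int) :
    ((List.range t.length).map (fun (j : ℕ) => ((j : Int) + 1) * t.getD j 0)).sum = wsum t := by
  induction t with
  | nil => simp [wsum]
  | cons x t ih =>
    rw [List.length_cons, List.range_succ_eq_map]
    simp only [List.map_cons, List.map_map, List.sum_cons, Function.comp_def,
      List.getD_cons_zero, Nat.succ_eq_add_one, List.getD_cons_succ, wsum]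
    have hsplit : ((List.range t.length).map
        (fun (j : ℕ) => (((j + 1 : ℕ) : Int) + 1) * t.getD j 0)).sum
        = ((List.range t.length).map (fun (j : ℕ) => ((j : Int) + 1) * t.getD j 0)).sum
          + ((List.range t.length).map (fun (j : ℕ) => t.getD j 0)).sum := by
      rw [← List.sum_map_add]
      apply congrArg
      apply List.map_congr_left
      intro j _
      push_cast
      ring
    rw [hsplit, ih, sum_getD_range]
    ring

theorem foldl_max_shift (f : ℕ → Int) (L : List ℕ) :
    ∀ a c : Int, L.foldl (fun b k => max b (f k)) (max a c)
      = max c (L.foldl (fun b k => max b (f k)) a) := by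
  induction L with
  | nil => intro a c; simp [max_comm]
  | cons v L ih =>
    intro a c
    simp only [List.foldl_cons]
    have h : max (max a c) (f v) = max (max a (f v)) c := by omega
    rw [h, ih]

theorem foldl_maxw_char (s : List Int) :
    (List.range (s.length + 1)).foldl (fun b k => max b (wsum (s.drop k))) 0 = maxw s := by
  induction s with
  | nil => simp [maxw, wsum]
  | cons x t ih =>
    rw [List.length_cons, List.range_succ_eq_map]
    simp only [List.foldl_cons, List.drop_zero, List.foldl_map, Nat.succ_eq_add_one,
      List.drop_succ_cons]
    rw [foldl_max_shift (fun k => wsum (t.drop k)) _ 0 (wsum (x :: t)), ih, maxw]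
    omega

theorem range_cast (n : ℕ) :
    PySem.List.pyRange 0 (n : Int) 1 = (List.range n).map (Nat.cast : ℕ → ℤ) := by
  rw [PySem.List.pyRange_one]
  have h1 : ((n : Int) - 0).toNat = n := by omega
  rw [h1]
  exact List.map_congr_left (fun k _ => zero_add _)

-- A's index loop, reduced to a foldr over the list itself
theorem foldl_max_congr (L : List ℕ) (f g : ℕ → Int) (h : ∀ k ∈ L, f k = g k) :
    ∀ a : Int, L.foldl (fun b k => max b (f k)) a = L.foldl (fun b k => max b (g k)) a := by
  induction L with
  | nil => intro a; rfl
  | cons v L ih =>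
    intro a
    simp only [List.foldl_cons]
    rw [h v (List.mem_cons_self), ih (fun k hk => h k (List.mem_cons_of_mem v hk))]

theorem foldl_getD_rev (g : (Int × Int × Int) → Int → (Int × Int × Int)) :
    ∀ (s : List Int) (init : Int × Int × Int),
    (List.range s.length).reverse.foldl (fun acc k => g acc (s.getD k 0)) init
      = s.foldr (fun x acc => g acc x) init := by
  intro s
  induction s using List.reverseRecOn with
  | nil => intro init; simp
  | append_singleton t x ih =>
    intro init
    rw [List.length_append, List.length_singleton, List.range_succ, List.reverse_append,
      List.reverse_singleton]
    simp only [List.singleton_append, List.foldl_cons]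
    have hget : (t ++ [x]).getD t.length 0 = x := by
      rw [List.getD_eq_getElem?_getD, List.getElem?_append_right (le_refl _)]
      simp
    rw [hget]
    have hcong : ∀ (acc : Int × Int × Int) (k : ℕ), k ∈ (List.range t.length).reverse →
        g acc ((t ++ [x]).getD k 0) = g acc (t.getD k 0) := by
      intro acc k hk
      simp only [List.mem_reverse, List.mem_range] at hk
      congr 1
      rw [List.getD_eq_getElem?_getD, List.getD_eq_getElem?_getD, List.getElem?_append_left hk]
    rw [PySem.List.foldl_congr_mem ((List.range t.length).reverse)
      (fun acc k => g acc ((t ++ [x]).getD k 0)) (fun acc k => g acc (t.getD k 0))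
      (g init x) hcong, ih (g init x), List.foldr_append, List.foldr_cons,
      List.foldr_nil]

-- A's index loop, reduced to a foldr over the list itself
theorem portA_eq_maxw (s : List Int) :
    (((PySem.List.pyRange 0 (s.length : Int) 1).reverse).foldl
      (fun (acc : Int × Int × Int) i =>
        (max acc.1 (acc.2.1 + (acc.2.2 + PySem.List.pyGetD s i 0)),
          acc.2.1 + (acc.2.2 + PySem.List.pyGetD s i 0),
          acc.2.2 + PySem.List.pyGetD s i 0)) (0, 0, 0)).1 = maxw s := by
  rw [range_cast, ← List.map_reverse, List.foldl_map]
  simp only [PySem.List.pyGetD_natCast]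
  rw [foldl_getD_rev (fun acc x =>
      (max acc.1 (acc.2.1 + (acc.2.2 + x)), acc.2.1 + (acc.2.2 + x), acc.2.2 + x)) s (0, 0, 0)]
  rw [foldrA_char]

-- B's inner sum at cut point k equals wsum of the suffix
theorem cur_eq_wsum (s : List Int) (k : ℕ) (hk : k ≤ s.length) :
    ((PySem.List.pyRange (k : Int) (s.length : Int) 1).map
      (fun i => (i - (k : Int) + 1) * PySem.List.pyGetD s i 0)).foldl (· + ·) 0
      = wsum (s.drop k) := by
  rw [PySem.List.pyRange_one, List.map_map]
  have hm : (((s.length : Int) - (k : Int)).toNat) = (s.drop k).length := by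
    rw [List.length_drop]; omega
  rw [hm]
  have hbody : (List.range (s.drop k).length).map
      ((fun i => (i - (k : Int) + 1) * PySem.List.pyGetD s i 0) ∘ fun j : ℕ => (k : Int) + (j : Int))
      = (List.range (s.drop k).length).map (fun (j : ℕ) => ((j : Int) + 1) * (s.drop k).getD j 0) := by
    apply List.map_congr_left
    intro j hj
    simp only [List.mem_range, List.length_drop] at hj
    have hcast : ((k : Int) + (j : Int)) = ((k + j : ℕ) : Int) := by push_cast; ring
    simp only [Function.comp_apply, hcast, PySem.List.pyGetD_natCast]
    have hget : s.getD (k + j) 0 = (s.drop k).getD j 0 := by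
      rw [List.getD_eq_getElem?_getD, List.getD_eq_getElem?_getD, List.getElem?_drop]
    rw [hget]
    push_cast
    ring
  rw [hbody, foldl_sum, wsum_eq_sum_range]

theorem loops_agree (s : List Int) :
    (((PySem.List.pyRange 0 (s.length : Int) 1).reverse).foldl
      (fun (acc : Int × Int × Int) i =>
        (max acc.1 (acc.2.1 + (acc.2.2 + PySem.List.pyGetD s i 0)),
          acc.2.1 + (acc.2.2 + PySem.List.pyGetD s i 0),
          acc.2.2 + PySem.List.pyGetD s i 0)) (0, 0, 0)).1
    = (PySem.List.pyRange 0 ((s.length : Int) + 1) 1).foldl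
        (fun best start =>
          max best (((PySem.List.pyRange start (s.length : Int) 1).map
            (fun i => (i - start + 1) * PySem.List.pyGetD s i 0)).foldl (· + ·) 0)) 0 := by
  rw [portA_eq_maxw]
  have hcast : ((s.length : Int) + 1) = ((s.length + 1 : ℕ) : Int) := by push_cast; ring
  rw [hcast, range_cast, List.foldl_map]
  rw [foldl_max_congr (List.range (s.length + 1))
    (fun k : ℕ => ((PySem.List.pyRange ((k : ℕ) : Int) ((s.length : ℕ) : Int) 1).map
      (fun i => (i - ((k : ℕ) : Int) + 1) * PySem.List.pyGetD s i 0)).foldl (· + ·) 0)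
    (fun k => wsum (s.drop k))
    (fun k hk => cur_eq_wsum s k (by simp only [List.mem_range] at hk; omega)) 0,
    foldl_maxw_char]

-- ===== VERDICT (by name: the statement is the Claim_ definition above) =====
theorem reduceDishes2_spec : Claim_equal_reduceDishes2 := by
  intro sat _
  unfold Spec_reduceDishes2 reduceDishes2 reduceDishes2_alt
  exact loops_agree (PySem.List.sorted sat id false)
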